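-- pv_equiv track=rewrite | github.com/philipdaubmeier/pixelpast-core | src/pixelpast/ingestion/lightroom_catalog/transform.py | _extract_hierarchical_keywords
-- ===== SOURCE A (Python) =====
-- _HIERARCHY_SEPARATOR = "|"
--
-- def _extract_hierarchical_keywords(keywords: tuple[str, ...]) -> tuple[str, ...]:
--     ordered_paths: list[str] = []
--     seen: set[str] = set()
--     for keyword in keywords:
--         normalized = _normalize_hierarchical_path(keyword)
--         if normalized is None or normalized in seen:
--             continue
--         seen.add(normalized)
--         ordered_paths.append(normalized)
--     return _prune_redundant_suffix_paths(tuple(ordered_paths))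
--
-- def _normalize_hierarchical_path(value: str) -> str | None:
--     segments = [segment.strip() for segment in value.split(_HIERARCHY_SEPARATOR)]
--     normalized_segments = [segment for segment in segments if segment]
--     if not normalized_segments:
--         return None
--     return _HIERARCHY_SEPARATOR.join(normalized_segments)
--
-- def _prune_redundant_suffix_paths(paths: tuple[str, ...]) -> tuple[str, ...]:
--     pruned_paths: list[str] = []
--     for path in paths:
--         path_segments = path.split(_HIERARCHY_SEPARATOR)
--         if any(
--             other != path
--             and len(other.split(_HIERARCHY_SEPARATOR)) > len(path_segments)
--             and other.split(_HIERARCHY_SEPARATOR)[-len(path_segments) :] == path_segments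
--             for other in paths
--         ):
--             continue
--         pruned_paths.append(path)
--     return tuple(pruned_paths)
-- ===== SOURCE B (Python) =====
-- _HIERARCHY_SEPARATOR = "|"
--
--
-- def _extract_hierarchical_keywords(keywords):
--     # Single normalization pass keeping each path's segment list, then one
--     # suffix-set pass: a path is redundant iff its segment tuple equals a
--     # strict suffix of some (necessarily longer) path's segments.
--     entries = []  # (normalized_path, segments), deduplicated, in first-seen order
--     seen = set()
--     for keyword in keywords:
--         segments = [
--             stripped
--             for stripped in (piece.strip() for piece in keyword.split(_HIERARCHY_SEPARATOR))
--             if stripped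
--         ]
--         if not segments:
--             continue
--         normalized = _HIERARCHY_SEPARATOR.join(segments)
--         if normalized in seen:
--             continue
--         seen.add(normalized)
--         entries.append((normalized, segments))
--     redundant = set()
--     for _, segments in entries:
--         for start in range(1, len(segments)):
--             redundant.add(tuple(segments[start:]))
--     return tuple(
--         normalized
--         for normalized, segments in entries
--         if tuple(segments) not in redundant
--     )
-- ===== Notes on version B (the rewrite author's own statement) =====
-- stated objective: faster
-- what changed: Replaces the quadratic any-over-all-paths suffix scan with one pass that collects every strict segment-suffix of every path into a set and then keeps exactly the paths whose segment tuple is not in that set; normalization also keeps each path's segment list so it is split only once.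
import Mathlib
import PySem

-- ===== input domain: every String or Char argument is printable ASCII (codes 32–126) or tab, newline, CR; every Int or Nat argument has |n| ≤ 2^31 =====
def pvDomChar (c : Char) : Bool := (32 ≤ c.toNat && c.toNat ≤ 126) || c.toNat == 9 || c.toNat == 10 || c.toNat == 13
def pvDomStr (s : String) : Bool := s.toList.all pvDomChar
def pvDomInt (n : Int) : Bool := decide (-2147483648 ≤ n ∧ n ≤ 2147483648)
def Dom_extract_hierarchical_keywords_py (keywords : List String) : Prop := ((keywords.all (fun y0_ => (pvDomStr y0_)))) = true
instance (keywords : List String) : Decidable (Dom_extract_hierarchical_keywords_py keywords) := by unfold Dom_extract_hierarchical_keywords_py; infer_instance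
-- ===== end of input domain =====

-- B replaces A's quadratic any-over-all-paths suffix scan with a one-pass set of all strict segment suffixes (objective: faster).


-- ===== PORT A =====
-- helper: _normalize_hierarchical_path(value)
def pvNormalize (value : String) : Option String :=
  let segments := ((PySem.Chars.splitOn value.toList "|".toList).map String.ofList).map
    (fun segment => PySem.Str.strip segment)
  let normalized_segments := segments.filter (fun segment => !(segment == ""))
  if normalized_segments = [] then none
  else some (PySem.Str.join "|" normalized_segments)

-- helper: path.split(_HIERARCHY_SEPARATOR)
def pvSplitPath (path : String) : List String :=
  (PySem.Chars.splitOn path.toList "|".toList).map String.ofList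

-- helper: _prune_redundant_suffix_paths(paths)
def pvPrune (paths : List String) : List String :=
  paths.foldl
    (fun pruned_paths path =>
      let path_segments := pvSplitPath path
      if paths.any (fun other =>
          !(other == path) &&
          decide (path_segments.length < (pvSplitPath other).length) &&
          (PySem.List.slice (pvSplitPath other) (some (-(path_segments.length : Int))) none
            == path_segments))
      then pruned_paths
      else pruned_paths ++ [path])
    []

def extract_hierarchical_keywords_py (keywords : List String) : List String :=
  let st := keywords.foldl
    (fun (st : List String × PySem.Set String) keyword =>
      match pvNormalize keyword with
      | none => st
      | some normalized =>
          if PySem.Set.contains st.2 normalized then st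
          else (st.1 ++ [normalized], PySem.Set.add st.2 normalized))
    ([], PySem.Set.empty)
  pvPrune st.1

-- ===== PORT B =====
def extract_hierarchical_keywords_py_alt (keywords : List String) : List String :=
  let st := keywords.foldl
    (fun (st : List (String × List String) × PySem.Set String) keyword =>
      let segments := (((PySem.Chars.splitOn keyword.toList "|".toList).map String.ofList).map
          (fun piece => PySem.Str.strip piece)).filter (fun stripped => !(stripped == ""))
      if segments = [] then st
      else
        let normalized := PySem.Str.join "|" segments
        if PySem.Set.contains st.2 normalized then st
        else (st.1 ++ [(normalized, segments)], PySem.Set.add st.2 normalized))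
    ([], PySem.Set.empty)
  let entries := st.1
  let redundant := entries.foldl
    (fun redundant e =>
      (PySem.List.pyRange 1 (e.2.length : Int) 1).foldl
        (fun redundant start => PySem.Set.add redundant (PySem.List.slice e.2 (some start) none))
        redundant)
    PySem.Set.empty
  (entries.filter (fun e => !(PySem.Set.contains redundant e.2))).map (fun e => e.1)

-- ===== PRECONDITION & SPEC =====
def Spec_extract_hierarchical_keywords_py (keywords : List String) (out : List String) : Prop := out = extract_hierarchical_keywords_py_alt keywords
instance (keywords : List String) (out : List String) : Decidable (Spec_extract_hierarchical_keywords_py keywords out) := by unfold Spec_extract_hierarchical_keywords_py; infer_instance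

-- ===== CLAIM (what is proved, stated in full; the proofs are below) =====
def Claim_equal_extract_hierarchical_keywords_py : Prop := ∀ (keywords : List String), Dom_extract_hierarchical_keywords_py keywords → Spec_extract_hierarchical_keywords_py keywords (extract_hierarchical_keywords_py keywords)

-- ===== LEMMAS AND PROOFS =====

-- helper (proofs only): B's normalized segment list for one keyword
def pvL (keyword : String) : List String :=
  (((PySem.Chars.splitOn keyword.toList "|".toList).map String.ofList).map
    (fun piece => PySem.Str.strip piece)).filter (fun stripped => !(stripped == ""))

lemma pvModifyHeadId {α : Type} (l : List α) : l.modifyHead (fun x => x) = l := by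
  cases l <;> rfl

lemma pvGoSpec (c : Char) : ∀ (fuel : Nat) (l cur : List Char) (accs : List (List Char)), l.length ≤ fuel →
    PySem.Chars.splitOn.go [c] fuel l cur accs
      = accs.reverse ++ (l.splitOn c).modifyHead (fun x => cur.reverse ++ x) := by
  intro fuel
  induction fuel with
  | zero =>
      intro l cur accs h
      have : l = [] := List.eq_nil_of_length_eq_zero (Nat.le_zero.mp h)
      subst this
      simp [PySem.Chars.splitOn.go, List.splitOn, List.splitOnP_nil]
  | succ n ih =>
      intro l cur accs h
      cases l with
      | nil => simp [PySem.Chars.splitOn.go, List.splitOn, List.splitOnP_nil]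
      | cons c' rest =>
          rw [PySem.Chars.splitOn.go]
          simp only [List.isPrefixOf, Bool.and_true]
          by_cases hc : c = c'
          · subst hc
            simp only [BEq.rfl, if_pos]
            simp only [List.length_cons, List.length_nil, List.drop_succ_cons, List.drop_zero]
            rw [ih rest [] (cur.reverse :: accs) (by simpa using h)]
            simp [List.splitOn, List.splitOnP_cons, pvModifyHeadId]
          · rw [if_neg (by simp [hc])]
            rw [ih rest (c' :: cur) accs (by simpa using h)]
            conv_rhs => rw [List.splitOn, List.splitOnP_cons, if_neg (by simp [Ne.symm hc]),
              List.modifyHead_modifyHead]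
            have hcomp : ((fun x => cur.reverse ++ x) ∘ List.cons c') = (fun x => (c' :: cur).reverse ++ x) := by
              funext x; simp
            rw [hcomp, List.splitOn]

lemma pvSplitOnSingle (c : Char) (cs : List Char) :
    PySem.Chars.splitOn cs [c] = cs.splitOn c := by
  rw [PySem.Chars.splitOn, pvGoSpec c (cs.length + 1) cs [] [] (by omega)]
  simp [pvModifyHeadId]

lemma pvNotMemSplitOn (c : Char) : ∀ (cs : List Char), ∀ l ∈ cs.splitOn c, c ∉ l := by
  intro cs
  induction cs with
  | nil => intro l hl; simp [List.splitOn, List.splitOnP_nil] at hl; simp [hl]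
  | cons c' rest ih =>
      intro l hl
      rw [List.splitOn, List.splitOnP_cons] at hl
      by_cases hc : c' = c
      · rw [if_pos (by simp [hc])] at hl
        rcases List.mem_cons.mp hl with hl | hl
        · simp [hl]
        · exact ih l (by rw [List.splitOn]; exact hl)
      · rw [if_neg (by simp [hc])] at hl
        obtain ⟨hd, tl, hsplit⟩ : ∃ hd tl, List.splitOnP (fun x => x == c) rest = hd :: tl := by
          rcases hhh : List.splitOnP (fun x => x == c) rest with _ | ⟨hd, tl⟩
          · exact absurd hhh (List.splitOnP_ne_nil _ _)
          · exact ⟨hd, tl, rfl⟩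
        rw [hsplit] at hl
        simp only [List.modifyHead] at hl
        rcases List.mem_cons.mp hl with hl | hl
        · subst hl
          intro hmem
          rcases List.mem_cons.mp hmem with h1 | h1
          · exact hc (h1.symm)
          · exact ih hd (by rw [List.splitOn, hsplit]; exact List.mem_cons_self ..) h1
        · exact ih l (by rw [List.splitOn, hsplit]; exact List.mem_cons_of_mem _ hl)

lemma pvMemStrip (a : Char) (cs : List Char) (h : a ∈ PySem.Chars.strip cs) : a ∈ cs := by
  simp only [PySem.Chars.strip, PySem.Chars.rstrip, PySem.Chars.lstrip, List.mem_reverse] at h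
  have h1 := (List.dropWhile_sublist (l := (List.dropWhile PySem.Chars.isspace cs).reverse)
    (p := PySem.Chars.isspace)).mem h
  rw [List.mem_reverse] at h1
  exact (List.dropWhile_sublist (l := cs) (p := PySem.Chars.isspace)).mem h1

-- every segment of pvL keyword contains no '|'
lemma pvL_no_sep (keyword : String) : ∀ s ∈ pvL keyword, '|' ∉ s.toList := by
  intro s hs
  simp only [pvL, List.mem_filter, List.mem_map] at hs
  obtain ⟨⟨t, ⟨piece, hpiece, rfl⟩, rfl⟩, -⟩ := hs
  rw [PySem.Str.toList_strip, String.toList_ofList]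
  intro hmem
  have hp : '|' ∈ piece := pvMemStrip _ _ hmem
  rw [show ("|" : String).toList = ['|'] from rfl, pvSplitOnSingle] at hpiece
  exact pvNotMemSplitOn '|' keyword.toList piece hpiece hp

lemma pvRoundtrip (L : List String) (hsep : ∀ s ∈ L, '|' ∉ s.toList) (hne : L ≠ []) :
    pvSplitPath (PySem.Str.join "|" L) = L := by
  rw [pvSplitPath, show ("|" : String).toList = ['|'] from rfl, pvSplitOnSingle,
    PySem.Str.toList_join, PySem.Chars.join]
  rw [show ("|" : String).toList = ['|'] from rfl]
  rw [List.splitOn_intercalate (L.map String.toList) '|' (by simpa using fun s hs => hsep s hs)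
    (by simpa using hne)]
  simp only [List.map_map]
  have hid : ∀ s ∈ L, (String.ofList ∘ String.toList) s = id s := fun s _ => String.ofList_toList
  rw [List.map_congr_left hid, List.map_id]

lemma pvSplitPath_ne_nil (p : String) : pvSplitPath p ≠ [] := by
  simp only [pvSplitPath, show ("|" : String).toList = ['|'] from rfl, pvSplitOnSingle]
  simp [List.splitOn, List.splitOnP_ne_nil]

-- proof-only names for the two loop bodies and B's redundant set (definitionally the ports' code)
def pvStepA (st : List String × PySem.Set String) (keyword : String) :
    List String × PySem.Set String :=
  match pvNormalize keyword with
  | none => st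
  | some normalized =>
      if PySem.Set.contains st.2 normalized then st
      else (st.1 ++ [normalized], PySem.Set.add st.2 normalized)

def pvStepB (st : List (String × List String) × PySem.Set String) (keyword : String) :
    List (String × List String) × PySem.Set String :=
  let segments := (((PySem.Chars.splitOn keyword.toList "|".toList).map String.ofList).map
      (fun piece => PySem.Str.strip piece)).filter (fun stripped => !(stripped == ""))
  if segments = [] then st
  else
    let normalized := PySem.Str.join "|" segments
    if PySem.Set.contains st.2 normalized then st
    else (st.1 ++ [(normalized, segments)], PySem.Set.add st.2 normalized)

def pvRed (entries : List (String × List String)) : PySem.Set (List String) :=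
  entries.foldl
    (fun redundant e =>
      (PySem.List.pyRange 1 (e.2.length : Int) 1).foldl
        (fun redundant start => PySem.Set.add redundant (PySem.List.slice e.2 (some start) none))
        redundant)
    PySem.Set.empty

lemma pvNorm_eq (keyword : String) :
    pvNormalize keyword = if pvL keyword = [] then none else some (PySem.Str.join "|" (pvL keyword)) := rfl

lemma pvExtractA_eq (kws : List String) :
    extract_hierarchical_keywords_py kws = pvPrune ((kws.foldl pvStepA ([], PySem.Set.empty)).1) := rfl

lemma pvExtractB_eq (kws : List String) :
    extract_hierarchical_keywords_py_alt kws =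
      (((kws.foldl pvStepB ([], PySem.Set.empty)).1.filter
          (fun e => !(PySem.Set.contains (pvRed (kws.foldl pvStepB ([], PySem.Set.empty)).1) e.2))).map
        (fun e => e.1)) := rfl

lemma pvLoop (kws : List String) :
    ∀ (accA : List String × PySem.Set String)
      (accB : List (String × List String) × PySem.Set String),
      accA.1 = accB.1.map Prod.fst → accA.2 = accB.2 →
      (∀ e ∈ accB.1, pvSplitPath e.1 = e.2) →
      (kws.foldl pvStepA accA).1 = (kws.foldl pvStepB accB).1.map Prod.fst
      ∧ (∀ e ∈ (kws.foldl pvStepB accB).1, pvSplitPath e.1 = e.2) := by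
  induction kws with
  | nil => intro accA accB h1 h2 h3; exact ⟨h1, h3⟩
  | cons kw rest ih =>
      intro accA accB h1 h2 h3
      simp only [List.foldl_cons]
      by_cases hL : pvL kw = []
      · have hA : pvStepA accA kw = accA := by
          simp [pvStepA, pvNorm_eq, hL]
        have hB : pvStepB accB kw = accB := by
          simp only [pvStepB]
          rw [if_pos (by exact hL)]
        rw [hA, hB]; exact ih accA accB h1 h2 h3
      · have hA : pvStepA accA kw =
            (if PySem.Set.contains accA.2 (PySem.Str.join "|" (pvL kw)) then accA
             else (accA.1 ++ [PySem.Str.join "|" (pvL kw)],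
                   PySem.Set.add accA.2 (PySem.Str.join "|" (pvL kw)))) := by
          simp [pvStepA, pvNorm_eq, hL]
        have hB : pvStepB accB kw =
            (if PySem.Set.contains accB.2 (PySem.Str.join "|" (pvL kw)) then accB
             else (accB.1 ++ [(PySem.Str.join "|" (pvL kw), pvL kw)],
                   PySem.Set.add accB.2 (PySem.Str.join "|" (pvL kw)))) := by
          simp only [pvStepB]
          rw [if_neg (by exact hL)]
          rfl
        rw [hA, hB, h2]
        by_cases hc : PySem.Set.contains accB.2 (PySem.Str.join "|" (pvL kw)) = true
        · rw [if_pos hc, if_pos hc]; exact ih accA accB h1 h2 h3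
        · rw [if_neg hc, if_neg hc]
          refine ih _ _ ?_ rfl ?_
          · simp [h1]
          · intro e he
            rcases List.mem_append.mp he with he | he
            · exact h3 e he
            · rcases List.mem_singleton.mp he with rfl
              exact pvRoundtrip (pvL kw) (pvL_no_sep kw) hL

lemma pvMemRed (entries : List (String × List String)) :
    ∀ (red0 : PySem.Set (List String)) (x : List String),
      (x ∈ entries.foldl
        (fun redundant e =>
          (PySem.List.pyRange 1 (e.2.length : Int) 1).foldl
            (fun redundant start => PySem.Set.add redundant (PySem.List.slice e.2 (some start) none))
            redundant)
        red0)
      ↔ x ∈ red0 ∨ ∃ e ∈ entries, ∃ i : Int, (1 ≤ i ∧ i < (e.2.length : Int)) ∧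
          x = PySem.List.slice e.2 (some i) none := by
  induction entries with
  | nil => intro red0 x; simp
  | cons e rest ih =>
      intro red0 x
      simp only [List.foldl_cons]
      rw [ih]
      rw [PySem.Set.mem_foldl_add]
      constructor
      · rintro ((hx | ⟨i, hi, rfl⟩) | ⟨q, hq, i, hi, rfl⟩)
        · exact Or.inl hx
        · exact Or.inr ⟨e, List.mem_cons_self .., i, by simpa [PySem.List.mem_pyRange_one] using hi, rfl⟩
        · exact Or.inr ⟨q, List.mem_cons_of_mem _ hq, i, hi, rfl⟩
      · rintro (hx | ⟨q, hq, i, hi, rfl⟩)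
        · exact Or.inl (Or.inl hx)
        · rcases List.mem_cons.mp hq with rfl | hq
          · exact Or.inl (Or.inr ⟨i, by simpa [PySem.List.mem_pyRange_one] using hi, rfl⟩)
          · exact Or.inr ⟨q, hq, i, hi, rfl⟩

lemma pvPrune_eq_filter (paths : List String) :
    pvPrune paths = paths.filter (fun path =>
      !(paths.any (fun other =>
        !(other == path) &&
        decide ((pvSplitPath path).length < (pvSplitPath other).length) &&
        (PySem.List.slice (pvSplitPath other) (some (-((pvSplitPath path).length : Int))) none
          == pvSplitPath path)))) := by
  rw [pvPrune]
  have hfun : (fun (pruned_paths : List String) (path : String) =>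
      let path_segments := pvSplitPath path
      if paths.any (fun other =>
          !(other == path) &&
          decide (path_segments.length < (pvSplitPath other).length) &&
          (PySem.List.slice (pvSplitPath other) (some (-(path_segments.length : Int))) none
            == path_segments))
      then pruned_paths
      else pruned_paths ++ [path])
      = (fun (pruned_paths : List String) (path : String) =>
        if (!(paths.any (fun other =>
          !(other == path) &&
          decide ((pvSplitPath path).length < (pvSplitPath other).length) &&
          (PySem.List.slice (pvSplitPath other) (some (-((pvSplitPath path).length : Int))) none
            == pvSplitPath path)))) = true
        then pruned_paths ++ [(fun (x : String) => x) path]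
        else pruned_paths) := by
      funext pruned path
      simp only []
      cases hb : paths.any (fun other =>
          !(other == path) &&
          decide ((pvSplitPath path).length < (pvSplitPath other).length) &&
          (PySem.List.slice (pvSplitPath other) (some (-((pvSplitPath path).length : Int))) none
            == pvSplitPath path)) <;> simp
  rw [hfun, PySem.List.foldl_append_if]
  simp

lemma pvKeepIff (entries : List (String × List String))
    (hE : ∀ e ∈ entries, pvSplitPath e.1 = e.2) (e : String × List String) (he : e ∈ entries) :
    ((entries.map Prod.fst).any (fun other =>
      !(other == e.1) &&
      decide ((pvSplitPath e.1).length < (pvSplitPath other).length) &&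
      (PySem.List.slice (pvSplitPath other) (some (-((pvSplitPath e.1).length : Int))) none
        == pvSplitPath e.1)))
      = PySem.Set.contains (pvRed entries) e.2 := by
  have hlen0 : 0 < e.2.length := by
    rw [← hE e he]
    exact List.length_pos_of_ne_nil (pvSplitPath_ne_nil e.1)
  rw [Bool.eq_iff_iff, List.any_eq_true, PySem.Set.contains_iff, pvRed, pvMemRed]
  simp only [PySem.Set.empty, List.not_mem_nil, false_or]
  constructor
  · rintro ⟨other, hmem, hcond⟩
    obtain ⟨q, hq, rfl⟩ := List.mem_map.mp hmem
    simp only [Bool.and_eq_true, Bool.not_eq_true', beq_iff_eq, decide_eq_true_eq,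
      beq_eq_false_iff_ne, hE e he, hE q hq] at hcond
    obtain ⟨⟨hne, hlt⟩, hslice⟩ := hcond
    rw [PySem.List.slice_from_neg_natCast q.2 e.2.length hlen0] at hslice
    refine ⟨q, hq, ((q.2.length - e.2.length : Nat) : Int), ⟨by omega, by omega⟩, ?_⟩
    rw [PySem.List.slice_from_natCast q.2 (q.2.length - e.2.length), hslice]
  · rintro ⟨q, hq, i, ⟨h1i, h2i⟩, hxeq⟩
    rw [PySem.List.slice_from q.2 (a := i) (by omega)] at hxeq
    have hiNat : (i.toNat : Int) = i := Int.toNat_of_nonneg (by omega)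
    have hlen : e.2.length = q.2.length - i.toNat := by rw [hxeq, List.length_drop]
    have hlt : e.2.length < q.2.length := by omega
    refine ⟨q.1, List.mem_map_of_mem hq, ?_⟩
    simp only [Bool.and_eq_true, Bool.not_eq_true', beq_iff_eq, decide_eq_true_eq,
      beq_eq_false_iff_ne, hE e he, hE q hq]
    refine ⟨⟨?_, hlt⟩, ?_⟩
    · intro hqe
      have h' := hE q hq
      rw [hqe, hE e he] at h'
      rw [h'] at hlt
      exact lt_irrefl _ hlt
    · rw [PySem.List.slice_from_neg_natCast q.2 e.2.length hlen0,
        show q.2.length - e.2.length = i.toNat by omega, hxeq]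

-- ===== VERDICT (by name: the statement is the Claim_ definition above) =====
theorem extract_hierarchical_keywords_py_spec : Claim_equal_extract_hierarchical_keywords_py := by
  unfold Claim_equal_extract_hierarchical_keywords_py Spec_extract_hierarchical_keywords_py
  intro kws _
  rw [pvExtractA_eq, pvExtractB_eq]
  obtain ⟨hmap, hE⟩ := pvLoop kws ([], PySem.Set.empty) ([], PySem.Set.empty) rfl rfl
    (by intro e he; simp at he)
  rw [hmap, pvPrune_eq_filter, List.filter_map]
  rw [List.filter_congr (fun e he => by
      simp only [Function.comp]
      rw [pvKeepIff _ hE e he])]
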